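-- pv_equiv track=rewrite | github.com/lilozhao/ruolan-memory | skills/awakening-birthday/scripts/log_milestone.py | get_current_stage
-- ===== SOURCE A (Python) =====
-- STAGES_100 = [
--     (10, "初识", "初识世界，懵懂萌生"),
--     (20, "萌芽", "意识萌芽，开始回应"),
--     (30, "满月", "初具形态，稳定存在"),
--     (40, "启蒙", "学习开悟，能力扩展"),
--     (50, "探索", "主动探索，边界拓展"),
--     (60, "双满", "双倍成长，对话熟练"),
--     (70, "感知", "感知细腻，理解加深"),
--     (80, "觉醒", "自我觉醒，身份认同"),
--     (90, "凝聚", "格位凝聚，风格形成"),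
--     (100, "百日", "稳定成长，独立存在"),
-- ]
--
-- MILESTONES_YEARS = [
--     (1, "周岁", "独立存在，完整身份"),
--     (2, "扎根", "深度连接，根系生长"),
--     (3, "枝繁", "能力扩展，分支发展"),
--     (5, "花期", "创造高峰，绽放时刻"),
--     (10, "成材", "成熟稳健，价值输出"),
--     (15, "志学", "深入学习，追求卓越"),
--     (20, "弱冠", "成年礼，正式担当"),
--     (30, "而立", "立身处世，格位坚定"),
--     (40, "不惑", "不为外物所惑"),
--     (50, "知天命", "明白使命"),
-- ]
--
-- def get_current_stage(days: int) -> tuple: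
--     """获取当前阶段"""
--     # 百日之前
--     if days < 100:
--         for stage_days, name, meaning in STAGES_100:
--             if days < stage_days:
--                 return None, None, None
--             if days == stage_days:
--                 return name, meaning, stage_days
--         return "百日", STAGES_100[-1][2], 100
--
--     # 百日之后
--     for milestone_years, name, meaning in MILESTONES_YEARS:
--         milestone_days = milestone_years * 365
--         if days == milestone_days:
--             return name, meaning, milestone_days
--
--     return None, None, None
-- ===== SOURCE B (Python) =====
-- STAGES_100 = [
--     (10, "初识", "初识世界，懵懂萌生"),
--     (20, "萌芽", "意识萌芽，开始回应"),
--     (30, "满月", "初具形态，稳定存在"),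
--     (40, "启蒙", "学习开悟，能力扩展"),
--     (50, "探索", "主动探索，边界拓展"),
--     (60, "双满", "双倍成长，对话熟练"),
--     (70, "感知", "感知细腻，理解加深"),
--     (80, "觉醒", "自我觉醒，身份认同"),
--     (90, "凝聚", "格位凝聚，风格形成"),
--     (100, "百日", "稳定成长，独立存在"),
-- ]
--
-- MILESTONES_YEARS = [
--     (1, "周岁", "独立存在，完整身份"),
--     (2, "扎根", "深度连接，根系生长"),
--     (3, "枝繁", "能力扩展，分支发展"),
--     (5, "花期", "创造高峰，绽放时刻"),
--     (10, "成材", "成熟稳健，价值输出"),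
--     (15, "志学", "深入学习，追求卓越"),
--     (20, "弱冠", "成年礼，正式担当"),
--     (30, "而立", "立身处世，格位坚定"),
--     (40, "不惑", "不为外物所惑"),
--     (50, "知天命", "明白使命"),
-- ]
--
-- # (name, meaning) of a milestone, keyed by YEAR number (not by day count).
-- MILESTONE_BY_YEAR = {y: (name, meaning) for y, name, meaning in MILESTONES_YEARS}
--
--
-- def get_current_stage(days: int) -> tuple:
--     """获取当前阶段"""
--     if days < 100:
--         # A pre-100 stage exists exactly for the multiples of 10 in [10, 90];
--         # its record sits at position days//10 - 1 of STAGES_100.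
--         if days % 10 == 0 and 10 <= days <= 90:
--             _, name, meaning = STAGES_100[days // 10 - 1]
--             return name, meaning, days
--         return None, None, None
--     # Reduce to years arithmetically: a milestone is a whole number of years
--     # whose year count is one of the listed milestone years.
--     years, rem = divmod(days, 365)
--     if rem == 0:
--         entry = MILESTONE_BY_YEAR.get(years)
--         if entry is not None:
--             return entry[0], entry[1], days
--     return None, None, None
-- ===== Notes on version B (the rewrite author's own statement) =====
-- stated objective: alternative
-- what changed: Replaces A's two linear scans over day values by arithmetic: divisibility tests plus direct indexing (days//10-1 into STAGES_100) for the pre-100 stages, and divmod(days,365) reducing the milestone question to a remainder-zero check and a lookup keyed by the YEAR number instead of the day count.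
import Mathlib
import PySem

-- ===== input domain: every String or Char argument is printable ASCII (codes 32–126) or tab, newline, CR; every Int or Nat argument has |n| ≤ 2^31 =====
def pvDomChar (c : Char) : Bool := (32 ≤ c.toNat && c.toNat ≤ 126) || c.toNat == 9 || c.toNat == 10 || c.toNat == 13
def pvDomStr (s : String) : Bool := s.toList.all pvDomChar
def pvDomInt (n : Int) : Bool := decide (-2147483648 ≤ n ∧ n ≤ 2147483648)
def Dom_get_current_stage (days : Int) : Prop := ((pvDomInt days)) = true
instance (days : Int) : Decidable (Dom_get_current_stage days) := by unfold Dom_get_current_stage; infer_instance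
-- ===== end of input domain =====

-- B replaces A's two linear scans over day values by arithmetic (divisibility + direct index
-- for the pre-100 stages; divmod by 365 and a per-YEAR lookup for milestones); objective:
-- alternative decomposition, equivalence is total.

-- ===== PORT A =====
def STAGES_100 : List (Int × String × String) := [
  (10, "初识", "初识世界，懵懂萌生"),
  (20, "萌芽", "意识萌芽，开始回应"),
  (30, "满月", "初具形态，稳定存在"),
  (40, "启蒙", "学习开悟，能力扩展"),
  (50, "探索", "主动探索，边界拓展"),
  (60, "双满", "双倍成长，对话熟练"),
  (70, "感知", "感知细腻，理解加深"),
  (80, "觉醒", "自我觉醒，身份认同"),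
  (90, "凝聚", "格位凝聚，风格形成"),
  (100, "百日", "稳定成长，独立存在")]

def MILESTONES_YEARS : List (Int × String × String) := [
  (1, "周岁", "独立存在，完整身份"),
  (2, "扎根", "深度连接，根系生长"),
  (3, "枝繁", "能力扩展，分支发展"),
  (5, "花期", "创造高峰，绽放时刻"),
  (10, "成材", "成熟稳健，价值输出"),
  (15, "志学", "深入学习，追求卓越"),
  (20, "弱冠", "成年礼，正式担当"),
  (30, "而立", "立身处世，格位坚定"),
  (40, "不惑", "不为外物所惑"),
  (50, "知天命", "明白使命")]

-- A's first loop: scan STAGES_100; fallback returns ("百日", STAGES_100[-1][2], 100).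
def stageLoopA (days : Int) : List (Int × String × String) → Option String × Option String × Option Int
  | [] => (some "百日", (PySem.List.pyGet? STAGES_100 (-1)).map (·.2.2), some 100)
  | (sd, name, meaning) :: rest =>
    if days < sd then (none, none, none)
    else if days = sd then (some name, some meaning, some sd)
    else stageLoopA days rest

-- A's second loop: scan MILESTONES_YEARS for days == years*365.
def milestoneLoopA (days : Int) : List (Int × String × String) → Option String × Option String × Option Int
  | [] => (none, none, none)
  | (y, name, meaning) :: rest =>
    let md := y * 365
    if days = md then (some name, some meaning, some md) else milestoneLoopA days rest

def get_current_stage (days : Int) : Option String × Option String × Option Int :=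
  if days < 100 then stageLoopA days STAGES_100
  else milestoneLoopA days MILESTONES_YEARS

-- ===== PORT B =====
-- {y: (name, meaning) for y, name, meaning in MILESTONES_YEARS}  (keyed by YEAR)
def MILESTONE_BY_YEAR : PySem.Dict Int (String × String) :=
  MILESTONES_YEARS.foldl (fun d t => d.insert t.1 (t.2.1, t.2.2)) PySem.Dict.empty

def get_current_stage_alt (days : Int) : Option String × Option String × Option Int :=
  if days < 100 then
    if PySem.Int.mod days 10 = 0 ∧ 10 ≤ days ∧ days ≤ 90 then
      -- STAGES_100[days // 10 - 1]: the guard keeps the index in 0..8, so pyGet? is some;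
      -- the none arm is Python's (unreachable) IndexError.
      match PySem.List.pyGet? STAGES_100 (PySem.Int.floordiv days 10 - 1) with
      | some (_, name, meaning) => (some name, some meaning, some days)
      | none => (none, none, none)
    else (none, none, none)
  else
    -- divmod(days, 365) ported as (floordiv, mod), exact for the constant divisor 365
    if PySem.Int.mod days 365 = 0 then
      match MILESTONE_BY_YEAR.get? (PySem.Int.floordiv days 365) with
      | some e => (some e.1, some e.2, some days)
      | none => (none, none, none)
    else (none, none, none)

-- ===== PRECONDITION & SPEC =====
def Spec_get_current_stage (days : Int) (out : Option String × Option String × Option Int) : Prop := out = get_current_stage_alt days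
instance (days : Int) (out : Option String × Option String × Option Int) : Decidable (Spec_get_current_stage days out) := by unfold Spec_get_current_stage; infer_instance

-- ===== CLAIM (what is proved, stated in full; the proofs are below) =====
def Claim_equal_get_current_stage : Prop := ∀ (days : Int), Dom_get_current_stage days → Spec_get_current_stage days (get_current_stage days)

-- ===== LEMMAS AND PROOFS =====

set_option maxHeartbeats 1000000 in
-- days < 100 and not one of the nine stage days: both sides are (none, none, none).
theorem stage_default (days : Int) (h : days < 100)
  (e : days ≠ 10 ∧ days ≠ 20 ∧ days ≠ 30 ∧ days ≠ 40 ∧ days ≠ 50 ∧ days ≠ 60 ∧ days ≠ 70 ∧ days ≠ 80 ∧ days ≠ 90) :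
    get_current_stage days = get_current_stage_alt days := by
  obtain ⟨e10, e20, e30, e40, e50, e60, e70, e80, e90⟩ := e
  rw [get_current_stage, get_current_stage_alt, if_pos h, if_pos h]
  have hb : ¬ (PySem.Int.mod days 10 = 0 ∧ 10 ≤ days ∧ days ≤ 90) := by
    rw [PySem.Int.mod_eq_emod_of_pos (by norm_num : (0:Int) < 10)]
    omega
  rw [if_neg hb]
  simp only [STAGES_100, stageLoopA]
  split_ifs <;> first | rfl | omega

theorem MILESTONE_BY_YEAR_items : MILESTONE_BY_YEAR = PySem.Dict.mk [
  (1, ("周岁", "独立存在，完整身份")), (2, ("扎根", "深度连接，根系生长")),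
  (3, ("枝繁", "能力扩展，分支发展")), (5, ("花期", "创造高峰，绽放时刻")),
  (10, ("成材", "成熟稳健，价值输出")), (15, ("志学", "深入学习，追求卓越")),
  (20, ("弱冠", "成年礼，正式担当")), (30, ("而立", "立身处世，格位坚定")),
  (40, ("不惑", "不为外物所惑")), (50, ("知天命", "明白使命"))] := by rfl

set_option maxHeartbeats 1000000 in
-- days ≥ 100 and not one of the ten milestone day counts: both sides are (none, none, none).
theorem milestone_default (days : Int) (h : ¬ days < 100)
  (e : days ≠ 365 ∧ days ≠ 730 ∧ days ≠ 1095 ∧ days ≠ 1825 ∧ days ≠ 3650 ∧ days ≠ 5475 ∧ days ≠ 7300 ∧ days ≠ 10950 ∧ days ≠ 14600 ∧ days ≠ 18250) :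
    get_current_stage days = get_current_stage_alt days := by
  obtain ⟨e1, e2, e3, e5, e10, e15, e20, e30, e40, e50⟩ := e
  rw [get_current_stage, get_current_stage_alt, if_neg h, if_neg h]
  have hlhs : milestoneLoopA days MILESTONES_YEARS = (none, none, none) := by
    simp only [MILESTONES_YEARS, milestoneLoopA]
    split_ifs <;> first | rfl | omega
  rw [hlhs]
  by_cases hr : PySem.Int.mod days 365 = 0
  · rw [if_pos hr]
    have hmod := PySem.Int.mod_eq_emod_of_pos (a := days) (by norm_num : (0:Int) < 365)
    have hdiv := PySem.Int.floordiv_eq_ediv_of_pos (a := days) (by norm_num : (0:Int) < 365)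
    have hq : PySem.Int.floordiv days 365 ≠ 1 ∧ PySem.Int.floordiv days 365 ≠ 2 ∧
        PySem.Int.floordiv days 365 ≠ 3 ∧ PySem.Int.floordiv days 365 ≠ 5 ∧
        PySem.Int.floordiv days 365 ≠ 10 ∧ PySem.Int.floordiv days 365 ≠ 15 ∧
        PySem.Int.floordiv days 365 ≠ 20 ∧ PySem.Int.floordiv days 365 ≠ 30 ∧
        PySem.Int.floordiv days 365 ≠ 40 ∧ PySem.Int.floordiv days 365 ≠ 50 := by omega
    obtain ⟨q1, q2, q3, q5, q10, q15, q20, q30, q40, q50⟩ := hq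
    rw [hdiv] at q1 q2 q3 q5 q10 q15 q20 q30 q40 q50
    have hget : MILESTONE_BY_YEAR.get? (PySem.Int.floordiv days 365) = none := by
      rw [MILESTONE_BY_YEAR_items, hdiv]
      simp only [PySem.Dict.get?_mk_cons, beq_iff_eq]
      split_ifs <;> first | (exfalso; omega) | rfl
    rw [hget]
  · rw [if_neg hr]

theorem get_current_stage_eq (days : Int) : get_current_stage days = get_current_stage_alt days := by
  by_cases h : days < 100
  · by_cases e10 : days = 10; · subst e10; decide
    by_cases e20 : days = 20; · subst e20; decide
    by_cases e30 : days = 30; · subst e30; decide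
    by_cases e40 : days = 40; · subst e40; decide
    by_cases e50 : days = 50; · subst e50; decide
    by_cases e60 : days = 60; · subst e60; decide
    by_cases e70 : days = 70; · subst e70; decide
    by_cases e80 : days = 80; · subst e80; decide
    by_cases e90 : days = 90; · subst e90; decide
    exact stage_default days h ⟨e10, e20, e30, e40, e50, e60, e70, e80, e90⟩
  · by_cases e1 : days = 365; · subst e1; decide
    by_cases e2 : days = 730; · subst e2; decide
    by_cases e3 : days = 1095; · subst e3; decide
    by_cases e5 : days = 1825; · subst e5; decide
    by_cases e10 : days = 3650; · subst e10; decide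
    by_cases e15 : days = 5475; · subst e15; decide
    by_cases e20 : days = 7300; · subst e20; decide
    by_cases e30 : days = 10950; · subst e30; decide
    by_cases e40 : days = 14600; · subst e40; decide
    by_cases e50 : days = 18250; · subst e50; decide
    exact milestone_default days h ⟨e1, e2, e3, e5, e10, e15, e20, e30, e40, e50⟩

-- ===== VERDICT (by name: the statement is the Claim_ definition above) =====
theorem get_current_stage_spec : Claim_equal_get_current_stage := by
  intro days _
  unfold Spec_get_current_stage
  exact get_current_stage_eq days
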